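-- pv_equiv track=rewrite | github.com/Unfettered-b/codon_optimization | scripts/fungal_filters.py | find_motifs
-- ===== SOURCE A (Python) =====
-- def find_motifs(seq, motifs):
--     hits = []
--     for motif in motifs:
--         start = 0
--         while True:
--             pos = seq.find(motif, start)
--             if pos == -1:
--                 break
--             hits.append((motif, pos))
--             start = pos + 1
--     return hits
-- ===== SOURCE B (Python) =====
-- def find_motifs(seq, motifs):
--     n = len(seq)
--     return [(m, i)
--             for m in motifs
--             for i in range(n - len(m) + 1)
--             if seq[i:i + len(m)] == m]
-- ===== Notes on version B (the rewrite author's own statement) =====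
-- stated objective: simpler
-- what changed: Replaces A's per-motif while-loop of repeated seq.find calls with a flat comprehension that enumerates every window start in range(n - len(m) + 1) and compares the slice, one uniform rule with no search-and-restart state.
import Mathlib
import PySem

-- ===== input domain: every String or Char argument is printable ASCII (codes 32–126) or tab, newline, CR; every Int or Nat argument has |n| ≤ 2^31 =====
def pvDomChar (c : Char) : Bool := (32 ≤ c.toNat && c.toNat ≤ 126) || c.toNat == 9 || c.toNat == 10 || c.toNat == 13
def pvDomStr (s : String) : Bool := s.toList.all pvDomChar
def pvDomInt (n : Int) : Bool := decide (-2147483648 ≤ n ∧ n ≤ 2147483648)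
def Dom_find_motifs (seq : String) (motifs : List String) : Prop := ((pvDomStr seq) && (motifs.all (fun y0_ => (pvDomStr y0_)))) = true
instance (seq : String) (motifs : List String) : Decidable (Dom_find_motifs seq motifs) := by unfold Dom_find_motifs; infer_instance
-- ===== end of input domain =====

-- B replaces A's per-motif while-loop of repeated seq.find calls with a flat
-- comprehension over all window starts compared by slice (objective: simpler).

-- ===== PORT A =====
-- Termination helper for the while-loop: a non-(-1) result of find(sub, k) lies in [k, len].
theorem pvFindFromBounds (s sub : List Char) (k : Nat)
    (h : PySem.Chars.findFrom s sub (k : Int) ≠ -1) :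
    k ≤ s.length ∧ (k : Int) ≤ PySem.Chars.findFrom s sub (k : Int) ∧
      PySem.Chars.findFrom s sub (k : Int) ≤ (s.length : Int) := by
  have hfind := PySem.Chars.find_le_length (List.drop k (List.take s.length s)) sub
  have hneg := PySem.Chars.neg_one_le_find (List.drop k (List.take s.length s)) sub
  simp only [PySem.Chars.findFrom] at h ⊢
  split_ifs at h ⊢ with h1 h2
  all_goals simp_all
  all_goals omega

-- the 'while True' loop of A for one motif, searching from 'start'
def findLoop (seq motif : String) (start : Nat) : List (String × Int) :=
  let pos := PySem.Str.findFrom seq motif (start : Int)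
  if h : pos = -1 then []
  else (motif, pos) :: findLoop seq motif (pos.toNat + 1)
termination_by seq.toList.length + 1 - start
decreasing_by
  have hb := pvFindFromBounds seq.toList motif.toList start (by
    simpa [PySem.Str.findFrom_eq] using h)
  simp only [PySem.Str.findFrom_eq] at h ⊢
  omega

def find_motifs (seq : String) (motifs : List String) : List (String × Int) :=
  motifs.foldl (fun hits motif => hits ++ findLoop seq motif 0) []

-- ===== PORT B =====
-- the comprehension: for m in motifs, for i in range(n - len(m) + 1), if seq[i:i+len(m)] == m
def find_motifs_alt (seq : String) (motifs : List String) : List (String × Int) :=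
  let s := seq.toList
  let n := (s.length : Int)
  motifs.flatMap (fun m =>
    ((PySem.List.pyRange 0 (n - (m.toList.length : Int) + 1)).filter
        (fun i => PySem.List.slice s (some i) (some (i + (m.toList.length : Int))) == m.toList)).map
      (fun i => (m, i)))

-- ===== PRECONDITION & SPEC =====
def Spec_find_motifs (seq : String) (motifs : List String) (out : List (String × Int)) : Prop := out = find_motifs_alt seq motifs
instance (seq : String) (motifs : List String) (out : List (String × Int)) : Decidable (Spec_find_motifs seq motifs out) := by unfold Spec_find_motifs; infer_instance

-- ===== CLAIM (what is proved, stated in full; the proofs are below) =====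
def Claim_equal_find_motifs : Prop := ∀ (seq : String) (motifs : List String), Dom_find_motifs seq motifs → Spec_find_motifs seq motifs (find_motifs seq motifs)

-- ===== LEMMAS AND PROOFS =====

theorem pvPyRange01 (b : Int) :
    PySem.List.pyRange 0 b = (List.range b.toNat).map (fun k : Nat => (k : Int)) := by
  simp only [PySem.List.pyRange]
  split_ifs with h1 h2 h3
  · omega
  · have hc : (b - 0 + 1 - 1) / 1 = b := by omega
    rw [hc]
    simp
  · have : b.toNat = 0 := by omega
    simp [this]
  · omega
  · omega

-- no occurrence of m at or after position k means the filter over [k, k+c) is empty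
theorem pvNoMatchFilter (s m : List Char) (k c : Nat)
    (hni : ¬ m <:+: List.drop k s) :
    (List.range' k c).filter (fun i => decide (m <+: List.drop i s)) = [] := by
  rw [List.filter_eq_nil_iff]
  intro i hi
  simp only [List.mem_range'_1] at hi
  simp only [decide_eq_true_eq]
  intro hpre
  apply hni
  have hdrop : List.drop i s = List.drop (i - k) (List.drop k s) := by
    rw [List.drop_drop]; congr 1; omega
  rw [hdrop] at hpre
  exact hpre.isInfix.trans (List.drop_suffix _ _).isInfix

-- A's per-motif loop collects exactly the match positions ≥ k, in increasing order
theorem pvFindLoopEq (seq motif : String) (n : Nat) : ∀ k, seq.toList.length + 1 - k ≤ n →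
    findLoop seq motif k =
      ((List.range' k (seq.toList.length + 1 - k)).filter
          (fun i => decide (motif.toList <+: seq.toList.drop i))).map
        (fun i : Nat => (motif, (i : Int))) := by
  induction n with
  | zero =>
    intro k hk
    have h0 : seq.toList.length + 1 - k = 0 := by omega
    rw [findLoop, h0]
    have hk' : seq.toList.length < k := by omega
    have hfc : PySem.Chars.findFrom seq.toList motif.toList (k : Int) = -1 := by
      by_contra hne
      have := pvFindFromBounds seq.toList motif.toList k hne
      omega
    simp [PySem.Str.findFrom_eq, hfc]
  | succ n ih =>
    intro k hk
    set s := seq.toList with hs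
    set m := motif.toList with hm
    rw [findLoop]
    by_cases hpos : PySem.Str.findFrom seq motif (k : Int) = -1
    · simp only [hpos, reduceDIte]
      by_cases hkl : k ≤ s.length
      · have hni : ¬ m <:+: List.drop k s := by
          have := (PySem.Chars.findFrom_natCast_eq_neg_one_iff s m k hkl).mp
            (by simpa [PySem.Str.findFrom_eq] using hpos)
          exact this
        rw [pvNoMatchFilter s m k _ hni]
        rfl
      · have h0 : s.length + 1 - k = 0 := by omega
        rw [h0]; rfl
    · have hb := pvFindFromBounds s m k (by simpa [PySem.Str.findFrom_eq] using hpos)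
      obtain ⟨hkl, hge, hle⟩ := hb
      set pos := PySem.Chars.findFrom s m (k : Int) with hposdef
      have hfeq : PySem.Str.findFrom seq motif (k : Int) = pos := by
        rw [PySem.Str.findFrom_eq]
      have hspec := PySem.Chars.findFrom_natCast_spec s m k hkl
        (by simpa [PySem.Str.findFrom_eq] using hpos)
      obtain ⟨_, hpre, hnone⟩ := hspec
      set p := pos.toNat with hp
      have hpk : k ≤ p := by omega
      have hpl : p ≤ s.length := by omega
      have hposp : pos = (p : Int) := by omega
      simp only [hfeq, hposp, Int.toNat_natCast]
      rw [dif_neg (by omega)]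
      rw [ih (p + 1) (by omega)]
      have hsplit : List.range' k (s.length + 1 - k) =
          List.range' k (p - k) ++ p :: List.range' (p + 1) (s.length - p) := by
        have h1 : List.range' k ((p - k) + (s.length + 1 - p)) =
            List.range' k (p - k) ++ List.range' (k + 1 * (p - k)) (s.length + 1 - p) := by
          rw [List.range'_append]
        have h2 : s.length + 1 - k = (p - k) + (s.length + 1 - p) := by omega
        have h3 : k + 1 * (p - k) = p := by omega
        rw [h2, h1, h3]
        congr 1
        have h4 : s.length + 1 - p = (s.length - p) + 1 := by omega
        rw [h4, List.range'_succ]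
      rw [hsplit]
      rw [List.filter_append, List.filter_cons]
      have hnomatch : (List.range' k (p - k)).filter (fun i => decide (m <+: List.drop i s)) = [] := by
        rw [List.filter_eq_nil_iff]
        intro i hi
        simp only [List.mem_range'_1] at hi
        simp only [decide_eq_true_eq]
        exact hnone i hi.1 (by omega)
      rw [hnomatch]
      simp only [hpre, decide_true, if_pos]
      simp

theorem pvFilterMapCast (f : Int → Bool) (g : Nat → Bool)
    (hfg : ∀ j : Nat, f (j : Int) = g j) (mstr : String) : ∀ l : List Nat,
    (((l.map (fun j : Nat => (j : Int))).filter f).map (fun i => (mstr, i)))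
    = ((l.filter g).map (fun j : Nat => (mstr, (j : Int)))) := by
  intro l
  induction l with
  | nil => rfl
  | cons x xs ih =>
    simp only [List.map_cons, List.filter_cons, hfg]
    by_cases h : g x <;> simp [h, ih]

-- B's per-motif comprehension equals the canonical match list
theorem pvAltMotifEq (seq m : String) :
    ((PySem.List.pyRange 0 ((seq.toList.length : Int) - (m.toList.length : Int) + 1)).filter
        (fun i => PySem.List.slice seq.toList (some i) (some (i + (m.toList.length : Int))) == m.toList)).map
      (fun i => (m, i))
    = ((List.range' 0 (seq.toList.length + 1)).filter
          (fun i => decide (m.toList <+: seq.toList.drop i))).map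
        (fun i : Nat => (m, (i : Int))) := by
  set s := seq.toList with hs
  set t := m.toList with ht
  set n := s.length with hn
  set k := t.length with hk
  have hbt : ((n : Int) - (k : Int) + 1).toNat = n + 1 - k := by omega
  rw [pvPyRange01, hbt, List.range_eq_range']
  rw [pvFilterMapCast _ (fun j => decide (t <+: s.drop j)) (by
    intro j
    dsimp only
    rw [PySem.List.slice_natCast_add]
    have hbeq : ((s.drop j).take k == t) = decide ((s.drop j).take k = t) := by
      by_cases h : (s.drop j).take k = t <;> simp [h]
    rw [hbeq, decide_eq_decide]
    constructor
    · intro h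
      rw [← h]
      exact List.take_prefix _ _
    · intro hp
      exact (List.prefix_iff_eq_take.mp hp).symm) m]
  have hsplit : List.range' 0 (n + 1) =
      List.range' 0 (n + 1 - k) ++ List.range' (0 + 1 * (n + 1 - k)) (n + 1 - (n + 1 - k)) := by
    have h := List.range'_append (s := 0) (m := n + 1 - k) (n := n + 1 - (n + 1 - k)) (step := 1)
    rw [show (n + 1 - k) + (n + 1 - (n + 1 - k)) = n + 1 from by omega] at h
    exact h.symm
  rw [hsplit, List.filter_append]
  have htail : (List.range' (0 + 1 * (n + 1 - k)) (n + 1 - (n + 1 - k))).filter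
      (fun i => decide (t <+: s.drop i)) = [] := by
    rw [List.filter_eq_nil_iff]
    intro i hi
    simp only [List.mem_range'_1] at hi
    simp only [decide_eq_true_eq]
    intro hpre
    have hlen := hpre.length_le
    rw [List.length_drop] at hlen
    omega
  rw [htail, List.append_nil]

-- ===== VERDICT (by name: the statement is the Claim_ definition above) =====
theorem find_motifs_spec : Claim_equal_find_motifs := by
  intro seq motifs _
  unfold Spec_find_motifs find_motifs find_motifs_alt
  rw [PySem.List.foldl_append_eq_flatMap, List.nil_append]
  apply List.flatMap_congr
  intro m _
  rw [pvFindLoopEq seq m (seq.toList.length + 1) 0 (by omega)]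
  simp only [Nat.sub_zero]
  exact (pvAltMotifEq seq m).symm
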